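-- pv_equiv track=rewrite | github.com/PackingNut/ML_Projects- | projectCode2/k_Means_Model.py | _same_cluster_pairs
-- ===== SOURCE A (Python) =====
-- import itertools
--
-- def _same_cluster_pairs(labels):
--     groups = {}
--     for i, c in enumerate(labels):
--         groups.setdefault(int(c), []).append(i)
--     pairs = set()
--     for idxs in groups.values():
--         for i, j in itertools.combinations(idxs, 2):
--             pairs.add((i, j))
--     return pairs
-- ===== SOURCE B (Python) =====
-- def _same_cluster_pairs(labels):
--     # Dict-free re-implementation: for each first occurrence of a key (in order),
--     # rescan the list for all indices with that key and emit their ordered pairs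
--     # with nested index loops.  Same set of (i, j) pairs, i < j, as A.
--     keys = [int(c) for c in labels]
--     n = len(keys)
--     pairs = set()
--     for m in range(n):
--         if keys[m] in keys[:m]:
--             continue  # not the first occurrence of this key
--         idxs = [k for k in range(n) if keys[k] == keys[m]]
--         for a in range(len(idxs)):
--             for b in range(a + 1, len(idxs)):
--                 pairs.add((idxs[a], idxs[b]))
--     return pairs
-- ===== Notes on version B (the rewrite author's own statement) =====
-- stated objective: alternative
-- what changed: Replaces A's dict-of-index-lists grouping plus itertools.combinations with a dict-free pass: for each first occurrence of a key it rescans the list for matching indices and emits their pairs with two nested index loops.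
import Mathlib
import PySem

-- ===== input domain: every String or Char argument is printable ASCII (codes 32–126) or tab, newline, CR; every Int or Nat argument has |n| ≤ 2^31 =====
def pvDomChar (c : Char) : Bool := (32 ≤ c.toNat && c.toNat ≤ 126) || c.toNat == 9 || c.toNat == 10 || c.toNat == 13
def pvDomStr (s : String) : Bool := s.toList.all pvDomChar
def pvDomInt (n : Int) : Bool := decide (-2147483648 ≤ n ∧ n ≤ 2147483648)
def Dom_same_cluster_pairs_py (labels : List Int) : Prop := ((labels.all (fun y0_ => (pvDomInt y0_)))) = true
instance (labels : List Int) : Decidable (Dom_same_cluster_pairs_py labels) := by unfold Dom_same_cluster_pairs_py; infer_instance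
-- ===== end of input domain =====

-- B replaces A's dict-of-index-lists grouping + itertools.combinations with a dict-free
-- pass: for each first occurrence of a key it rescans the list for matching indices and
-- emits their pairs with two nested index loops (alternative decomposition, same result set).


-- ===== PORT A =====
def same_cluster_pairs_py (labels : List Int) : List (Int × Int) :=
  -- groups = {}; for i, c in enumerate(labels): groups.setdefault(int(c), []).append(i)
  -- (int() on an int is the identity; setdefault-then-append is Dict.modify with default [])
  let groups : PySem.Dict Int (List Int) :=
    (PySem.List.enumerate labels 0).foldl
      (fun g p => g.modify p.2 [] (fun v => v ++ [p.1])) PySem.Dict.empty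
  -- pairs = set(); for idxs in groups.values(): for i, j in combinations(idxs, 2): pairs.add((i, j))
  let pairs : PySem.Set (Int × Int) :=
    groups.values.foldl
      (fun s idxs =>
        (PySem.List.combinations idxs 2).foldl
          (fun s c =>
            match c with
            | [i, j] => PySem.Set.add s (i, j)
            | _ => s)  -- unreachable totality guard: combinations with r = 2 yields 2-element lists
          s)
      PySem.Set.empty
  pairs

-- ===== PORT B =====
def same_cluster_pairs_py_alt (labels : List Int) : List (Int × Int) :=
  -- keys = [int(c) for c in labels]  (int() on an int is the identity)
  let keys : List Int := labels.map (fun c => c)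
  let n : Int := PySem.List.len keys
  (PySem.List.pyRange 0 n 1).foldl
    (fun pairs m =>
      let km := PySem.List.pyGetD keys m 0
      if (PySem.List.slice keys none (some m)).contains km then
        pairs  -- continue: not the first occurrence of this key
      else
        let idxs : List Int :=
          (PySem.List.pyRange 0 n 1).foldl
            (fun acc k => if PySem.List.pyGetD keys k 0 == km then acc ++ [k] else acc) []
        (PySem.List.pyRange 0 (PySem.List.len idxs) 1).foldl
          (fun p a =>
            (PySem.List.pyRange (a + 1) (PySem.List.len idxs) 1).foldl
              (fun p b => PySem.Set.add p (PySem.List.pyGetD idxs a 0, PySem.List.pyGetD idxs b 0))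
              p)
          pairs)
    PySem.Set.empty

-- ===== PRECONDITION & SPEC =====
def Spec_same_cluster_pairs_py (labels : List Int) (out : List (Int × Int)) : Prop := out = same_cluster_pairs_py_alt labels
instance (labels : List Int) (out : List (Int × Int)) : Decidable (Spec_same_cluster_pairs_py labels out) := by unfold Spec_same_cluster_pairs_py; infer_instance

-- ===== CLAIM (what is proved, stated in full; the proofs are below) =====
def Claim_equal_same_cluster_pairs_py : Prop := ∀ (labels : List Int), Dom_same_cluster_pairs_py labels → Spec_same_cluster_pairs_py labels (same_cluster_pairs_py labels)

-- ===== LEMMAS AND PROOFS =====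

-- canonical description shared by both ports: for each first-occurrence index m (in order),
-- the ordered pairs of all indices holding the label labels[m]
def scpComb2 : List Int → List (Int × Int)
  | [] => []
  | x :: xs => xs.map (fun y => (x, y)) ++ scpComb2 xs

def scpOccs (labels : List Int) (l : Int) : List Int :=
  ((List.range labels.length).filter (fun k => labels.getD k 0 == l)).map (fun k => ((k : Nat) : Int))

def scpFirst (labels : List Int) : List Nat :=
  (List.range labels.length).filter (fun m => !((labels.take m).contains (labels.getD m 0)))

def scpCanon (labels : List Int) : List (Int × Int) :=
  (scpFirst labels).flatMap (fun m => scpComb2 (scpOccs labels (labels.getD m 0)))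

theorem scp_map_range_getD {α β : Type} [Inhabited α] (xs : List α) (d : α) (f : α → β) :
    (List.range xs.length).map (fun k => f (xs.getD k d)) = xs.map f := by
  apply List.ext_getElem
  · simp
  · intro i h1 h2
    have hi : i < xs.length := by simpa using h2
    simp [List.getD_eq_getElem?_getD, List.getElem?_eq_getElem hi]

-- chained set updates are one big update
theorem scp_foldl_update {α β : Type} [BEq α] (l : List β) (g : β → List α) (s : PySem.Set α) :
    l.foldl (fun s x => PySem.Set.update s (g x)) s = PySem.Set.update s (l.flatMap g) := by
  induction l generalizing s with
  | nil => simp [PySem.Set.update]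
  | cons x xs ih => simp [List.foldl_cons, ih, PySem.Set.update_append]

-- A's inner combinations fold is one update with scpComb2
theorem scp_comb_fold (idxs : List Int) (s : PySem.Set (Int × Int)) :
    (PySem.List.combinations idxs 2).foldl
      (fun s c => match c with
        | [i, j] => PySem.Set.add s (i, j)
        | _ => s) s
    = PySem.Set.update s (scpComb2 idxs) := by
  induction idxs generalizing s with
  | nil => simp [PySem.List.combinations_nil_succ, scpComb2, PySem.Set.update]
  | cons x xs ih =>
      rw [show (2:Nat) = 1 + 1 from rfl, PySem.List.combinations_cons_succ,
        List.foldl_append, PySem.List.combinations_one]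
      simp only [List.map_map]
      rw [List.foldl_map]
      simp only [Function.comp]
      rw [show (fun (s : PySem.Set (Int × Int)) (y : Int) =>
            (match [x, y] with
              | [i, j] => PySem.Set.add s (i, j)
              | _ => s)) = fun s y => PySem.Set.add s (x, y) from rfl]
      rw [← PySem.Set.update_map_eq_foldl_add, ih, scpComb2, PySem.Set.update_append]

-- the labels read off at the first-occurrence indices are exactly set(labels), in order
theorem scp_first_map (labels : List Int) :
    (scpFirst labels).map (fun m => labels.getD m 0) = PySem.Set.ofList labels := by
  induction labels using List.reverseRecOn with
  | nil => simp [scpFirst]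
  | append_singleton ls x ih =>
      have hfilter : ∀ m ∈ List.range ls.length,
          (!(( (ls ++ [x]).take m).contains ((ls ++ [x]).getD m 0)))
          = (!((ls.take m).contains (ls.getD m 0))) := by
        intro m hm
        rw [List.mem_range] at hm
        rw [List.take_append_of_le_length (le_of_lt hm),
          List.getD_eq_getElem?_getD, List.getElem?_append_left hm,
          ← List.getD_eq_getElem?_getD]
      have htake : (ls ++ [x]).take ls.length = ls := by simp
      have hget : (ls ++ [x])[ls.length]? = some x := by
        rw [List.getElem?_append_right (le_refl _)]; simp
      have hfirst : scpFirst (ls ++ [x])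
          = scpFirst ls ++ (if ls.contains x then [] else [ls.length]) := by
        unfold scpFirst
        rw [List.length_append, List.length_singleton, List.range_succ, List.filter_append,
          List.filter_congr hfilter]
        congr 1
        rw [List.filter_singleton]
        by_cases h : x ∈ ls <;>
          simp [htake, List.getD_eq_getElem?_getD, h]
      have hmlt : ∀ m ∈ scpFirst ls, m < ls.length := by
        intro m hm
        have hmem := List.mem_of_mem_filter hm
        simpa [List.mem_range] using hmem
      have hmap : (scpFirst ls).map (fun m => (ls ++ [x]).getD m 0)
          = (scpFirst ls).map (fun m => ls.getD m 0) := by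
        apply List.map_congr_left
        intro m hm
        rw [List.getD_eq_getElem?_getD, List.getElem?_append_left (hmlt m hm),
          ← List.getD_eq_getElem?_getD]
      rw [hfirst, List.map_append, PySem.Set.ofList_append_singleton, hmap, ih]
      by_cases h : x ∈ ls <;>
        simp [h, List.getD_eq_getElem?_getD, PySem.Set.mem_ofList]

theorem scp_shift_range (a b : Int) :
    PySem.List.pyRange (1 + a) (1 + b) 1 = (PySem.List.pyRange a b 1).map (fun j => 1 + j) := by
  rw [PySem.List.pyRange_one, PySem.List.pyRange_one, List.map_map]
  have : (1 + b - (1 + a)) = b - a := by ring_nf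
  rw [this]
  apply List.map_congr_left
  intro k _
  simp [Function.comp]
  ring

theorem scp_shift_range0 (b : Int) :
    PySem.List.pyRange (0 + 1) (1 + b) 1 = (PySem.List.pyRange 0 b 1).map (fun j => 1 + j) := by
  rw [show (0 : Int) + 1 = 1 + 0 by ring, scp_shift_range]

theorem scp_shift_get (x : Int) (xs : List Int) (j : Int) (h0 : 0 ≤ j) (h1 : j < xs.length) :
    PySem.List.pyGetD (x :: xs) (1 + j) 0 = PySem.List.pyGetD xs j 0 := by
  rw [PySem.List.pyGetD_eq_getElem _ _ (by omega) (by simp; omega),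
      PySem.List.pyGetD_eq_getElem _ _ h0 (by simpa using h1)]
  have : (1 + j).toNat = j.toNat + 1 := by omega
  simp [this]

-- B's nested index loops are one update with scpComb2
theorem scp_nested_fold (idxs : List Int) (p : PySem.Set (Int × Int)) :
    (PySem.List.pyRange 0 (PySem.List.len idxs) 1).foldl
      (fun p a =>
        (PySem.List.pyRange (a + 1) (PySem.List.len idxs) 1).foldl
          (fun p b => PySem.Set.add p (PySem.List.pyGetD idxs a 0, PySem.List.pyGetD idxs b 0))
          p)
      p
    = PySem.Set.update p (scpComb2 idxs) := by
  induction idxs generalizing p with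
  | nil => simp [PySem.List.len, PySem.List.pyRange_one_eq_nil, scpComb2, PySem.Set.update]
  | cons x xs ih =>
      have hlen : PySem.List.len (x :: xs) = 1 + (xs.length : Int) := by
        simp [PySem.List.len_eq]; ring
      rw [hlen, PySem.List.pyRange_one_cons (by positivity), List.foldl_cons]
      -- the a = 0 iteration adds (x, y) for every y in xs
      have hfirst : ∀ (q : PySem.Set (Int × Int)),
          (PySem.List.pyRange (0 + 1) (1 + (xs.length : Int)) 1).foldl
            (fun p b => PySem.Set.add p (PySem.List.pyGetD (x :: xs) 0 0, PySem.List.pyGetD (x :: xs) b 0)) q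
          = PySem.Set.update q (xs.map (fun y => (x, y))) := by
        intro q
        rw [scp_shift_range0, List.foldl_map]
        have hcong := PySem.List.foldl_congr_mem
          (l := PySem.List.pyRange 0 ((xs.length : Nat) : Int) 1) (init := q)
          (f := fun (p : PySem.Set (Int × Int)) (j : Int) =>
            PySem.Set.add p (PySem.List.pyGetD (x :: xs) 0 0, PySem.List.pyGetD (x :: xs) (1 + j) 0))
          (g := fun (p : PySem.Set (Int × Int)) (j : Int) =>
            PySem.Set.add p (x, PySem.List.pyGetD xs j 0))
          (by
            intro acc j hj
            rw [PySem.List.mem_pyRange_one] at hj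
            simp only [PySem.List.pyGetD_zero_cons,
              scp_shift_get x xs j hj.1 (by exact_mod_cast hj.2)])
        rw [hcong, PySem.List.pyRange_zero_natCast, List.foldl_map]
        simp only [PySem.List.pyGetD_natCast]
        have := PySem.Set.update_map_eq_foldl_add (s := q)
          (l := List.range xs.length) (f := fun k => (x, xs.getD k 0))
        rw [scp_map_range_getD xs 0 (fun y => (x, y))] at this
        rw [this]
      rw [hfirst]
      -- the remaining iterations are the loop on xs, shifted by one
      rw [scp_shift_range0, List.foldl_map]
      have houter := PySem.List.foldl_congr_mem
        (l := PySem.List.pyRange 0 ((xs.length : Nat) : Int) 1)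
        (init := PySem.Set.update p (xs.map (fun y => (x, y))))
        (f := fun (q : PySem.Set (Int × Int)) (j : Int) =>
          (PySem.List.pyRange (1 + j + 1) (1 + (xs.length : Int)) 1).foldl
            (fun p b => PySem.Set.add p (PySem.List.pyGetD (x :: xs) (1 + j) 0, PySem.List.pyGetD (x :: xs) b 0)) q)
        (g := fun (q : PySem.Set (Int × Int)) (j : Int) =>
          (PySem.List.pyRange (j + 1) ((xs.length : Nat) : Int) 1).foldl
            (fun p b => PySem.Set.add p (PySem.List.pyGetD xs j 0, PySem.List.pyGetD xs b 0)) q)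
        (by
          intro acc j hj
          rw [PySem.List.mem_pyRange_one] at hj
          have hja : (1 : Int) + j + 1 = 1 + (j + 1) := by ring
          simp only []
          rw [hja, scp_shift_range, List.foldl_map]
          apply PySem.List.foldl_congr_mem
          intro acc2 b hb
          rw [PySem.List.mem_pyRange_one] at hb
          simp only [scp_shift_get x xs j hj.1 (by exact_mod_cast hj.2),
            scp_shift_get x xs b (by omega) (by exact_mod_cast hb.2)])
      rw [houter]
      have hxs : ((xs.length : Nat) : Int) = PySem.List.len xs := by
        simp [PySem.List.len_eq]
      rw [hxs, ih, ← PySem.Set.update_append]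
      rfl

-- the dict built by A's grouping loop, with enumerate pushed inside
def scpDict (labels : List Int) : PySem.Dict Int (List Int) :=
  ((PySem.List.pyRange 0 (PySem.List.len labels) 1).map
      (fun j => (PySem.List.pyGetD labels j 0, j))).foldl
    (fun d p => d.modify p.1 [] (fun v => v ++ [p.2])) PySem.Dict.empty

theorem scp_dict_eq (labels : List Int) :
    (PySem.List.enumerate labels 0).foldl
      (fun g p => g.modify p.2 [] (fun v => v ++ [p.1])) PySem.Dict.empty
    = scpDict labels := by
  rw [PySem.List.enumerate_eq_map_pyRange labels 0]
  unfold scpDict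
  rw [List.foldl_map, List.foldl_map]

theorem scp_dict_keys (labels : List Int) :
    (scpDict labels).keys = PySem.Set.ofList labels := by
  unfold scpDict
  rw [PySem.Dict.keys_foldl_modify_key _ Prod.fst [] (fun _ p => (fun v => v ++ [p.2])) _]
  rw [List.map_map]
  have h1 : ((PySem.List.pyRange 0 (PySem.List.len labels) 1).map
      (Prod.fst ∘ fun j => (PySem.List.pyGetD labels j 0, j)))
      = labels := by
    simp only [PySem.List.len_eq]
    rw [PySem.List.pyRange_zero_natCast, List.map_map]
    show (List.range labels.length).map _ = labels
    rw [show (Prod.fst ∘ fun j => (PySem.List.pyGetD labels j 0, j)) ∘ (fun k : Nat => ((k:Nat):Int))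
        = fun k : Nat => labels.getD k 0 by funext k; simp [Function.comp]]
    have := scp_map_range_getD labels 0 (fun y => y)
    simpa using this
  rw [h1]
  have : (PySem.Dict.empty : PySem.Dict Int (List Int)).keys = ([] : List Int) := by
    simp [PySem.Dict.keys_empty]
  rw [this]
  exact PySem.Set.update_empty labels

theorem scp_dict_nodup (labels : List Int) : (scpDict labels).keys.Nodup := by
  unfold scpDict
  exact PySem.Dict.nodup_keys_foldl_modify_key _ Prod.fst [] (fun _ p => (fun v => v ++ [p.2])) _
    (by simp [PySem.Dict.keys_empty])

theorem scp_dict_getD (labels : List Int) (c : Int) :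
    (scpDict labels).getD c [] = scpOccs labels c := by
  unfold scpDict
  rw [PySem.Dict.getD_foldl_modify_append]
  rw [PySem.Dict.getD_empty, List.nil_append]
  rw [List.filter_map, List.map_map]
  simp only [PySem.List.len_eq]
  rw [PySem.List.pyRange_zero_natCast, List.filter_map, List.map_map]
  unfold scpOccs
  congr 1
  · apply List.filter_congr
    intro k _
    simp [Function.comp]

theorem scp_dict_values (labels : List Int) :
    (scpDict labels).values = (PySem.Set.ofList labels).map (fun c => scpOccs labels c) := by
  have hitems := PySem.Dict.items_eq_map_keys (scpDict labels) (scp_dict_nodup labels) []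
  have hv : (scpDict labels).values = (scpDict labels).items.map (fun p => p.2) := rfl
  rw [hv, hitems, List.map_map, scp_dict_keys]
  apply List.map_congr_left
  intro c _
  simp [Function.comp, scp_dict_getD]

theorem scp_a_canon (labels : List Int) :
    same_cluster_pairs_py labels = PySem.Set.ofList (scpCanon labels) := by
  show
    ((PySem.List.enumerate labels 0).foldl
        (fun g p => g.modify p.2 [] (fun v => v ++ [p.1])) PySem.Dict.empty).values.foldl
      (fun s idxs =>
        (PySem.List.combinations idxs 2).foldl
          (fun s c =>
            match c with
            | [i, j] => PySem.Set.add s (i, j)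
            | _ => s)
          s)
      PySem.Set.empty
    = PySem.Set.ofList (scpCanon labels)
  rw [scp_dict_eq, scp_dict_values]
  simp only [scp_comb_fold]
  rw [List.foldl_map]
  have := scp_foldl_update ((PySem.Set.ofList labels))
    (g := fun c => scpComb2 (scpOccs labels c)) (s := PySem.Set.empty)
  rw [this]
  rw [PySem.Set.update_empty]
  unfold scpCanon
  rw [← scp_first_map labels, List.flatMap_map]

theorem scp_b_canon (labels : List Int) :
    same_cluster_pairs_py_alt labels = PySem.Set.ofList (scpCanon labels) := by
  unfold same_cluster_pairs_py_alt
  simp only [List.map_id', PySem.List.len_eq]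
  rw [PySem.List.pyRange_zero_natCast, List.foldl_map]
  have hstep := PySem.List.foldl_congr_mem
    (l := List.range labels.length) (init := (PySem.Set.empty : PySem.Set (Int × Int)))
    (f := fun (pairs : PySem.Set (Int × Int)) (m : Nat) =>
      let km := PySem.List.pyGetD labels ((m : Nat) : Int) 0
      if (PySem.List.slice labels none (some ((m : Nat) : Int))).contains km then pairs
      else
        let idxs : List Int :=
          ((List.range labels.length).map (fun k => ((k : Nat) : Int))).foldl
            (fun acc k => if PySem.List.pyGetD labels k 0 == km then acc ++ [k] else acc) []
        (PySem.List.pyRange 0 ((idxs.length : Nat) : Int) 1).foldl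
          (fun p a =>
            (PySem.List.pyRange (a + 1) ((idxs.length : Nat) : Int) 1).foldl
              (fun p b => PySem.Set.add p (PySem.List.pyGetD idxs a 0, PySem.List.pyGetD idxs b 0)) p)
          pairs)
    (g := fun (pairs : PySem.Set (Int × Int)) (m : Nat) =>
      if (!((labels.take m).contains (labels.getD m 0)))
      then PySem.Set.update pairs (scpComb2 (scpOccs labels (labels.getD m 0)))
      else pairs)
    (by
      intro acc m hm
      simp only [PySem.List.pyGetD_natCast, PySem.List.slice_to_natCast]
      cases h : (labels.take m).contains (labels.getD m 0) with
      | true => simp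
      | false =>
          rw [if_neg (show ¬(false = true) by simp), if_pos (show (!false) = true by simp)]
          rw [List.foldl_map]
          simp only [PySem.List.pyGetD_natCast]
          rw [PySem.List.foldl_append_if (p := fun k => labels.getD k 0 == labels.getD m 0)
            (f := fun k : Nat => ((k : Nat) : Int))]
          rw [List.nil_append]
          rw [show ((List.range labels.length).filter
              (fun k => labels.getD k 0 == labels.getD m 0)).map (fun k => ((k : Nat) : Int))
              = scpOccs labels (labels.getD m 0) from rfl]
          have hn := scp_nested_fold (scpOccs labels (labels.getD m 0)) acc
          simp only [PySem.List.len_eq] at hn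
          exact hn)
  rw [hstep, PySem.List.foldl_if_eq_foldl_filter]
  rw [scp_foldl_update]
  rfl

-- ===== VERDICT (by name: the statement is the Claim_ definition above) =====
theorem same_cluster_pairs_py_spec : Claim_equal_same_cluster_pairs_py := by
  intro labels _
  unfold Spec_same_cluster_pairs_py
  rw [scp_a_canon, scp_b_canon]
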